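-- pv_equiv track=rewrite | github.com/yuening-lab/MTG | utils/event_data_processing.py | divide_data_online
-- ===== SOURCE A (Python) =====
-- def divide_data_online(x_data, y_data, lead_time, pred_wind):
--   # shift = lead_time - 1
--   # n = len(x_data)
--   # x_data = x_data[:n-shift]
--   # y_data = y_data[shift:]
--   # assert len(x_data) == len(y_data)
--   # print (len(x_data))
--   sets = []
--   sets.append([0, 316, 354, 392])
--   sets.append([0, 708, 746, 784])
--   sets.append([0, 1402, 1440, 1478])
--   sets.append([0, 1784, 1822, 1860])
--   sets.append([0, 2168, 2206, 2244])
--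
--   if pred_wind > 1 or 1:
--     y_data_window = [0 for i in range(len(y_data))]
--     for i,y in enumerate(y_data):
--       if y==1:
--         for j in range(max(i-lead_time-pred_wind+2, 0), i-lead_time+2):
--           y_data_window[j] = 1
--     # print (y_data_window)
--     y_data = y_data_window
--   x_train_l, x_valid_l, x_test_l, y_train_l, y_valid_l, y_test_l = [],[],[],[],[],[]
--   for s in sets:
--       cut_1, cut_2, cut_3, cut_4 = s[0], s[1], s[2], s[3]
--       x_train  = x_data[cut_1:cut_4]
--       y_train = y_data[cut_1:cut_4]
--       # x_train, x_valid, x_test = x_data[cut_1:cut_2], x_data[cut_2:cut_3], x_data[cut_3:cut_4]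
--       # y_train, y_valid, y_test = y_data[cut_1:cut_2], y_data[cut_2:cut_3], y_data[cut_3:cut_4]
--       x_train_l.append(x_train)
--       # x_valid_l.append(x_valid)
--       # x_test_l.append(x_test)
--       y_train_l.append(y_train)
--       # y_valid_l.append(y_valid)
--       # y_test_l.append(y_test)
--
--   # return x_train_l, x_valid_l, x_test_l, y_train_l, y_valid_l, y_test_l
--   return x_train_l, y_train_l
-- ===== SOURCE B (Python) =====
-- def divide_data_online(x_data, y_data, lead_time, pred_wind):
--     # Difference array: +1 at each window start, -1 past its (clamped) end,
--     # then one prefix-sum pass thresholds to the 0/1 event-window labels.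
--     n = len(y_data)
--     diff = [0] * (n + 1)
--     for i, y in enumerate(y_data):
--         if y == 1:
--             lo = max(i - lead_time - pred_wind + 2, 0)
--             hi = min(i - lead_time + 2, n)
--             if lo < hi:
--                 diff[lo] += 1
--                 diff[hi] -= 1
--     y_w = []
--     run = 0
--     for j in range(n):
--         run += diff[j]
--         y_w.append(1 if run > 0 else 0)
--     cuts = (392, 784, 1478, 1860, 2244)
--     return [x_data[:c] for c in cuts], [y_w[:c] for c in cuts]
-- ===== Notes on version B (the rewrite author's own statement) =====
-- stated objective: alternative
-- what changed: Replaces the per-event re-marking loop (writing 1 into every index of each event's window) by a difference array (+1 at window start, -1 past its clamped end) followed by one prefix-sum pass thresholded to 0/1, and builds the five train slices by a comprehension over the cut list.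
import Mathlib
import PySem

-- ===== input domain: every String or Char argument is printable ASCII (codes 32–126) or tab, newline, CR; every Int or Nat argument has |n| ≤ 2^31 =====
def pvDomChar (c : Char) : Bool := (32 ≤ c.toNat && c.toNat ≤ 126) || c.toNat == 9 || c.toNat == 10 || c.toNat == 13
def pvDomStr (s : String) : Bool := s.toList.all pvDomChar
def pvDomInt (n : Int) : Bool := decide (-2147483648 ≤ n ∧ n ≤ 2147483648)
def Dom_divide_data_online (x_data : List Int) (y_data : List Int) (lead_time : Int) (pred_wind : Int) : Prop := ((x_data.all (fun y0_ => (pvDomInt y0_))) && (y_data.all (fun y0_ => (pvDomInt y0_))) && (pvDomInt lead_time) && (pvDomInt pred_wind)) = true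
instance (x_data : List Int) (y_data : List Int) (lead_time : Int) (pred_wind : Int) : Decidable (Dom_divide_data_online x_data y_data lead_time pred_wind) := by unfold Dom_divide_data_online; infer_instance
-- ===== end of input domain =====

-- B replaces A's per-event window-marking loop by a difference array with one
-- prefix-sum pass; same return value on every input on which A returns.

-- ===== PORT A =====
-- body of A's outer marking loop: for an event (i, y) with y == 1, write 1 over the window
def dda_stepA (lead_time pred_wind : Int) (w : List Int) (iy : Int × Int) : List Int :=
  if iy.2 == 1 then
    (PySem.List.pyRange (max (iy.1 - lead_time - pred_wind + 2) 0) (iy.1 - lead_time + 2)).foldl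
      (fun w j => PySem.List.pySetD w j 1) w
  else w

def dda_markA (y_data : List Int) (lead_time pred_wind : Int) : List Int :=
  (PySem.List.enumerate y_data 0).foldl (dda_stepA lead_time pred_wind)
    (List.replicate y_data.length 0)

def dda_sets : List (List Int) :=
  [[0, 316, 354, 392], [0, 708, 746, 784], [0, 1402, 1440, 1478],
   [0, 1784, 1822, 1860], [0, 2168, 2206, 2244]]

def divide_data_online (x_data : List Int) (y_data : List Int) (lead_time : Int) (pred_wind : Int) : List (List Int) × List (List Int) :=
  let y' := dda_markA y_data lead_time pred_wind
  dda_sets.foldl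
    (fun acc s =>
      let cut_1 := PySem.List.pyGetD s 0 0
      let cut_4 := PySem.List.pyGetD s 3 0
      (acc.1 ++ [PySem.List.slice x_data (some cut_1) (some cut_4)],
       acc.2 ++ [PySem.List.slice y' (some cut_1) (some cut_4)]))
    ([], [])

-- ===== PORT B =====
-- body of B's diff-array loop: +1 at the clamped window start, -1 past its clamped end
def dda_stepB (lead_time pred_wind n : Int) (d : List Int) (iy : Int × Int) : List Int :=
  if iy.2 == 1 then
    let lo := max (iy.1 - lead_time - pred_wind + 2) 0
    let hi := min (iy.1 - lead_time + 2) n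
    if lo < hi then
      let d1 := PySem.List.pySetD d lo (PySem.List.pyGetD d lo 0 + 1)
      PySem.List.pySetD d1 hi (PySem.List.pyGetD d1 hi 0 - 1)
    else d
  else d

def dda_diff (y_data : List Int) (lead_time pred_wind : Int) : List Int :=
  (PySem.List.enumerate y_data 0).foldl
    (dda_stepB lead_time pred_wind (y_data.length : Int))
    (List.replicate (y_data.length + 1) 0)

-- body of B's prefix-sum loop
def dda_scanStep (diff : List Int) (st : Int × List Int) (j : Int) : Int × List Int :=
  let run := st.1 + PySem.List.pyGetD diff j 0
  (run, st.2 ++ [if run > 0 then (1 : Int) else 0])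

def dda_markB (y_data : List Int) (lead_time pred_wind : Int) : List Int :=
  ((PySem.List.pyRange 0 (y_data.length : Int)).foldl
    (dda_scanStep (dda_diff y_data lead_time pred_wind)) (0, [])).2

def dda_cuts : List Int := [392, 784, 1478, 1860, 2244]

def divide_data_online_alt (x_data : List Int) (y_data : List Int) (lead_time : Int) (pred_wind : Int) : List (List Int) × List (List Int) :=
  let y_w := dda_markB y_data lead_time pred_wind
  (dda_cuts.map (fun c => PySem.List.slice x_data none (some c)),
   dda_cuts.map (fun c => PySem.List.slice y_w none (some c)))

-- ===== PRECONDITION & SPEC =====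
-- Pre_ excludes exactly the inputs on which A raises IndexError: some y_data[k] == 1 whose
-- (nonempty) marking window reaches index k - lead_time + 1 >= len(y_data).
def Pre_divide_data_online (x_data : List Int) (y_data : List Int) (lead_time : Int) (pred_wind : Int) : Prop :=
  ∀ (k : Nat) (h : k < y_data.length), y_data[k] = 1 →
    max ((k : Int) - lead_time - pred_wind + 2) 0 < (k : Int) - lead_time + 2 →
    (k : Int) - lead_time + 2 ≤ (y_data.length : Int)

instance (x_data : List Int) (y_data : List Int) (lead_time : Int) (pred_wind : Int) : Decidable (Pre_divide_data_online x_data y_data lead_time pred_wind) := by unfold Pre_divide_data_online; infer_instance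

def pvWitness_divide_data_online : List Int × List Int × Int × Int := ([5, 6, 7], [0, 1, 0], 1, 2)

def Spec_divide_data_online (x_data : List Int) (y_data : List Int) (lead_time : Int) (pred_wind : Int) (out : List (List Int) × List (List Int)) : Prop := out = divide_data_online_alt x_data y_data lead_time pred_wind
instance (x_data : List Int) (y_data : List Int) (lead_time : Int) (pred_wind : Int) (out : List (List Int) × List (List Int)) : Decidable (Spec_divide_data_online x_data y_data lead_time pred_wind out) := by unfold Spec_divide_data_online; infer_instance

-- ===== CLAIM (what is proved, stated in full; the proofs are below) =====
def Claim_equal_divide_data_online : Prop := ∀ (x_data : List Int) (y_data : List Int) (lead_time : Int) (pred_wind : Int), Dom_divide_data_online x_data y_data lead_time pred_wind → Pre_divide_data_online x_data y_data lead_time pred_wind → Spec_divide_data_online x_data y_data lead_time pred_wind (divide_data_online x_data y_data lead_time pred_wind)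


-- ===== LEMMAS AND PROOFS =====

-- window bounds of an enumerated event e = (index, value)
def evL (lead_time pred_wind : Int) (e : Int × Int) : Int := max (e.1 - lead_time - pred_wind + 2) 0
def evH (lead_time : Int) (e : Int × Int) : Int := e.1 - lead_time + 2

-- out-of-range pySetD is a no-op
lemma pySetD_ge_length {α : Type} (xs : List α) {i : Int} (v : α)
    (h : (xs.length : Int) ≤ i) : PySem.List.pySetD xs i v = xs := by
  unfold PySem.List.pySetD PySem.List.pySet? PySem.List.pyIdx?
  split_ifs with h1 h2 h3 <;> simp_all <;> omega

-- pyGetD after an in-range pySetD, nonnegative Int indices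
lemma pyGetD_pySetD_int (w : List Int) (a v : Int) (ha : 0 ≤ a) (hr : a < (w.length : Int))
    (q : Int) (hq : 0 ≤ q) :
    PySem.List.pyGetD (PySem.List.pySetD w a v) q 0 = if q = a then v else PySem.List.pyGetD w q 0 := by
  have h := PySem.List.pyGetD_pySetD_natCast w a.toNat q.toNat v 0 (by omega)
  rw [show ((a.toNat : Nat) : Int) = a from by omega, show ((q.toNat : Nat) : Int) = q from by omega] at h
  rw [h]
  split_ifs with h1 h2 h3 <;> first | rfl | (exfalso; omega)

-- length preservation for A's inner fill
lemma len_foldl_pySetD (l : List Int) (w : List Int) :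
    (l.foldl (fun w j => PySem.List.pySetD w j 1) w).length = w.length := by
  induction l generalizing w with
  | nil => rfl
  | cons a l ih => simp [List.foldl, ih, PySem.List.length_pySetD]

-- A's inner fill: pointwise value
lemma fill_get_aux (m : Nat) : ∀ (a b : Int), 0 ≤ a → (b - a).toNat = m →
    ∀ (w : List Int) (j : Nat), j < w.length →
    PySem.List.pyGetD ((PySem.List.pyRange a b).foldl (fun w j => PySem.List.pySetD w j 1) w) (j : Int) 0
      = if a ≤ (j : Int) ∧ (j : Int) < b then 1 else PySem.List.pyGetD w (j : Int) 0 := by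
  induction m with
  | zero =>
      intro a b ha hm w j hj
      rw [PySem.List.pyRange_one_eq_nil (by omega)]
      simp only [List.foldl]
      rw [if_neg (by omega)]
  | succ m ih =>
      intro a b ha hm w j hj
      have hjlen : (j : Int) < (w.length : Int) := by exact_mod_cast hj
      rw [PySem.List.pyRange_one_cons (by omega)]
      simp only [List.foldl]
      rw [ih (a + 1) b (by omega) (by omega) _ j (by rw [PySem.List.length_pySetD]; exact hj)]
      by_cases hr : a < (w.length : Int)
      · rw [pyGetD_pySetD_int w a 1 ha hr (j : Int) (by omega)]
        split_ifs <;> first | rfl | (exfalso; omega)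
      · rw [pySetD_ge_length w 1 (by omega)]
        split_ifs <;> first | rfl | (exfalso; omega)

lemma fill_get (a b : Int) (ha : 0 ≤ a) (w : List Int) (j : Nat) (hj : j < w.length) :
    PySem.List.pyGetD ((PySem.List.pyRange a b).foldl (fun w j => PySem.List.pySetD w j 1) w) (j : Int) 0
      = if a ≤ (j : Int) ∧ (j : Int) < b then 1 else PySem.List.pyGetD w (j : Int) 0 :=
  fill_get_aux (b - a).toNat a b ha rfl w j hj

-- A's whole marking loop over an arbitrary event list: length and pointwise value
lemma markA_len (lt pw : Int) (E : List (Int × Int)) (w : List Int) :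
    (E.foldl (dda_stepA lt pw) w).length = w.length := by
  induction E generalizing w with
  | nil => rfl
  | cons e E ih =>
      simp only [List.foldl]
      rw [ih]
      unfold dda_stepA
      split <;> simp [len_foldl_pySetD]

lemma markA_get (lt pw : Int) (E : List (Int × Int)) (w : List Int) (j : Nat) (hj : j < w.length) :
    PySem.List.pyGetD (E.foldl (dda_stepA lt pw) w) (j : Int) 0
      = if (∃ e ∈ E, e.2 = 1 ∧ evL lt pw e ≤ (j : Int) ∧ (j : Int) < evH lt e) then 1
        else PySem.List.pyGetD w (j : Int) 0 := by
  induction E generalizing w with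
  | nil => simp
  | cons e E ih =>
      simp only [List.foldl]
      have hlen : (dda_stepA lt pw w e).length = w.length := by
        unfold dda_stepA; split <;> simp [len_foldl_pySetD]
      rw [ih _ (by rw [hlen]; exact hj)]
      by_cases he : e.2 = 1
      · have hstep : PySem.List.pyGetD (dda_stepA lt pw w e) (j : Int) 0
            = if evL lt pw e ≤ (j : Int) ∧ (j : Int) < evH lt e then 1
              else PySem.List.pyGetD w (j : Int) 0 := by
          unfold dda_stepA
          rw [if_pos (by simpa using he)]
          exact fill_get _ _ (le_max_right _ _) w j hj
        simp only [List.exists_mem_cons_iff, he, true_and]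
        rw [hstep]
        by_cases hE : ∃ e ∈ E, e.2 = 1 ∧ evL lt pw e ≤ (j : Int) ∧ (j : Int) < evH lt e
        · rw [if_pos hE, if_pos (Or.inr hE)]
        · rw [if_neg hE]
          by_cases hC : evL lt pw e ≤ (j : Int) ∧ (j : Int) < evH lt e
          · rw [if_pos hC, if_pos (Or.inl hC)]
          · rw [if_neg hC, if_neg (not_or.mpr ⟨hC, hE⟩)]
      · have hstep : dda_stepA lt pw w e = w := by
          unfold dda_stepA; rw [if_neg (by simpa using he)]
        rw [hstep]
        simp only [List.exists_mem_cons_iff, he, false_and, false_or]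

-- B's diff-array build: per-event contribution to slot t
def dOne (lt pw : Int) (nn : Nat) (e : Int × Int) (t : Int) : Int :=
  if e.2 = 1 ∧ evL lt pw e < min (evH lt e) (nn : Int) then
    (if t = evL lt pw e then 1 else 0) - (if t = min (evH lt e) (nn : Int) then 1 else 0)
  else 0

lemma stepB_get (lt pw : Int) (nn : Nat) (e : Int × Int) (d : List Int)
    (hd : d.length = nn + 1) (t : Nat) :
    PySem.List.pyGetD (dda_stepB lt pw (nn : Int) d e) (t : Int) 0
      = PySem.List.pyGetD d (t : Int) 0 + dOne lt pw nn e (t : Int) := by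
  by_cases he : e.2 = 1
  · have hbe : (e.2 == 1) = true := by simpa using he
    simp only [dda_stepB, hbe, if_true]
    by_cases hg : max (e.1 - lt - pw + 2) 0 < min (e.1 - lt + 2) (nn : Int)
    · rw [if_pos hg]
      unfold dOne evL evH
      rw [if_pos ⟨he, hg⟩]
      have hlo0 : (0 : Int) ≤ max (e.1 - lt - pw + 2) 0 := le_max_right _ _
      have hlolen : max (e.1 - lt - pw + 2) 0 < (d.length : Int) := by rw [hd]; push_cast; omega
      have hlen1 : ((PySem.List.pySetD d (max (e.1 - lt - pw + 2) 0) (PySem.List.pyGetD d (max (e.1 - lt - pw + 2) 0) 0 + 1)).length : Int) = (d.length : Int) := by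
        rw [PySem.List.length_pySetD]
      rw [pyGetD_pySetD_int _ _ _ (by omega) (by rw [hlen1, hd]; push_cast; omega) (t : Int) (by omega)]
      rw [pyGetD_pySetD_int d _ _ hlo0 hlolen (t : Int) (by omega)]
      by_cases h1 : (t : Int) = min (e.1 - lt + 2) (nn : Int)
      · rw [if_pos h1, pyGetD_pySetD_int d _ _ hlo0 hlolen _ (by omega)]
        rw [if_neg (by omega), if_neg (by omega), if_pos h1, ← h1]
        ring
      · rw [if_neg h1, if_neg h1]
        by_cases h2 : (t : Int) = max (e.1 - lt - pw + 2) 0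
        · rw [if_pos h2, if_pos h2, ← h2]; ring
        · rw [if_neg h2, if_neg h2]; ring
    · rw [if_neg hg]
      unfold dOne evL evH
      rw [if_neg (by tauto)]
      ring
  · have hbe : (e.2 == 1) = false := by simpa using he
    simp only [dda_stepB, hbe, Bool.false_eq_true, if_false]
    unfold dOne
    rw [if_neg (by tauto)]
    ring

lemma stepB_len (lt pw : Int) (nn : Nat) (e : Int × Int) (d : List Int) :
    (dda_stepB lt pw (nn : Int) d e).length = d.length := by
  simp only [dda_stepB]
  split
  · split <;> simp [PySem.List.length_pySetD]
  · rfl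

lemma diffB_get (lt pw : Int) (nn : Nat) (E : List (Int × Int)) : ∀ (d : List Int),
    d.length = nn + 1 → ∀ (t : Nat),
    PySem.List.pyGetD (E.foldl (dda_stepB lt pw (nn : Int)) d) (t : Int) 0
      = PySem.List.pyGetD d (t : Int) 0 + (E.map (fun e => dOne lt pw nn e (t : Int))).sum := by
  induction E with
  | nil => intro d hd t; simp
  | cons e E ih =>
      intro d hd t
      simp only [List.foldl, List.map_cons, List.sum_cons]
      rw [ih (dda_stepB lt pw (nn : Int) d e) (by rw [stepB_len]; exact hd) t]
      rw [stepB_get lt pw nn e d hd t]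
      ring

-- prefix sum of a list via pyGetD
def psum (d : List Int) (m : Nat) : Int :=
  ((List.range m).map (fun t : Nat => PySem.List.pyGetD d (t : Int) 0)).sum

-- B's scan loop
lemma scan_fold (d : List Int) (m : Nat) :
    (PySem.List.pyRange 0 (m : Int)).foldl (dda_scanStep d) (0, [])
    = (psum d m, (List.range m).map (fun j => if 0 < psum d (j + 1) then 1 else 0)) := by
  induction m with
  | zero => rw [PySem.List.pyRange_one_eq_nil (by omega)]; simp [psum]
  | succ m ih =>
      rw [show ((m + 1 : Nat) : Int) = (m : Int) + 1 from by push_cast; ring]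
      rw [PySem.List.pyRange_one_succ_right (by positivity), List.foldl_append, ih]
      have hps : psum d (m + 1) = psum d m + PySem.List.pyGetD d (m : Int) 0 := by
        simp [psum, List.range_succ]
      simp only [List.foldl, dda_scanStep, List.range_succ, List.map_append, List.map_cons,
        List.map_nil, hps]

-- sum over range of an indicator of a single Int value
lemma sum_range_ind (c : Int) (m : Nat) :
    ((List.range m).map (fun t : Nat => if (t : Int) = c then (1 : Int) else 0)).sum
      = if 0 ≤ c ∧ c < (m : Int) then 1 else 0 := by
  induction m with
  | zero =>
      simp only [List.range_zero, List.map_nil, List.sum_nil]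
      rw [if_neg (by omega)]
  | succ m ih =>
      rw [List.range_succ, List.map_append, List.sum_append, ih]
      simp only [List.map_cons, List.map_nil, List.sum_cons, List.sum_nil]
      push_cast
      split_ifs <;> omega

-- swap a double list sum
lemma sum_swap_list {β : Type} (E : List β) (m : Nat) (f : β → Nat → Int) :
    ((List.range m).map (fun t => (E.map (fun e => f e t)).sum)).sum
      = (E.map (fun e => ((List.range m).map (fun t => f e t)).sum)).sum := by
  induction E with
  | nil => simp
  | cons e E ih =>
      simp only [List.map_cons, List.sum_cons, ← ih]
      rw [← List.sum_map_add]

-- per-event prefix sum of dOne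
lemma dOne_sum (lt pw : Int) (nn : Nat) (e : Int × Int) (m : Nat) :
    ((List.range m).map (fun t : Nat => dOne lt pw nn e (t : Int))).sum
      = if e.2 = 1 ∧ evL lt pw e < min (evH lt e) (nn : Int)
          ∧ evL lt pw e ≤ (m : Int) - 1 ∧ (m : Int) - 1 < min (evH lt e) (nn : Int)
        then 1 else 0 := by
  by_cases hc : e.2 = 1 ∧ evL lt pw e < min (evH lt e) (nn : Int)
  · have hfun : (fun t : Nat => dOne lt pw nn e (t : Int))
        = fun t : Nat => (if (t : Int) = evL lt pw e then (1 : Int) else 0)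
            - (if (t : Int) = min (evH lt e) (nn : Int) then 1 else 0) := by
      funext t; simp [dOne, hc]
    rw [hfun]
    have hsub : ((List.range m).map (fun t : Nat => (if (t : Int) = evL lt pw e then (1 : Int) else 0)
            - (if (t : Int) = min (evH lt e) (nn : Int) then 1 else 0))).sum
        = ((List.range m).map (fun t : Nat => if (t : Int) = evL lt pw e then (1 : Int) else 0)).sum
          - ((List.range m).map (fun t : Nat => if (t : Int) = min (evH lt e) (nn : Int) then (1 : Int) else 0)).sum := by
      induction (List.range m) with
      | nil => simp
      | cons a l ihl => simp only [List.map_cons, List.sum_cons, ihl]; ring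
    rw [hsub, sum_range_ind, sum_range_ind]
    have h0 : (0 : Int) ≤ evL lt pw e := le_max_right _ _
    have h1 : evL lt pw e < min (evH lt e) (nn : Int) := hc.2
    simp only [hc.1, true_and, hc.2]
    split_ifs <;> omega
  · have hfun : (fun t : Nat => dOne lt pw nn e (t : Int)) = fun _ : Nat => (0 : Int) := by
      funext t; simp only [dOne, if_neg hc]
    rw [hfun, if_neg (by tauto)]
    simp

-- a sum of 0/1 indicators is positive iff some element satisfies the predicate
lemma sum_ind_pos {β : Type} (E : List β) (P : β → Prop) [DecidablePred P] :
    (0 < (E.map (fun e => if P e then (1 : Int) else 0)).sum) ↔ ∃ e ∈ E, P e := by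
  induction E with
  | nil => simp
  | cons e E ih =>
      simp only [List.map_cons, List.sum_cons, List.exists_mem_cons_iff, ← ih]
      have hnn : 0 ≤ (E.map (fun e => if P e then (1 : Int) else 0)).sum := by
        apply List.sum_nonneg
        intro x hx
        simp only [List.mem_map] at hx
        obtain ⟨y, _, hy⟩ := hx
        rw [← hy]; split_ifs <;> omega
      split_ifs with h <;> constructor <;> intro hh
      · exact Or.inl h
      · omega
      · simp only [zero_add] at hh; exact Or.inr hh
      · rcases hh with h' | h'
        · exact absurd h' h
        · omega

-- getD of a replicate of zeros
lemma pyGetD_replicate_zero (n : Nat) (t : Nat) :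
    PySem.List.pyGetD (List.replicate n (0 : Int)) (t : Int) 0 = 0 := by
  rw [PySem.List.pyGetD_of_nonneg _ _ (by omega)]
  simp only [Int.toNat_natCast]
  rcases Nat.lt_or_ge t n with h | h
  · simp [List.getD, h]
  · have hnone : (List.replicate n (0 : Int))[t]? = none := by
      rw [List.getElem?_eq_none_iff]
      simpa using h
    simp [List.getD, hnone]

-- prefix sums of the built diff array count the covering windows
lemma psum_diff (y_data : List Int) (lt pw : Int) (m : Nat) :
    psum (dda_diff y_data lt pw) m
      = (((PySem.List.enumerate y_data 0).map (fun e =>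
            if e.2 = 1 ∧ evL lt pw e < min (evH lt e) (y_data.length : Int)
              ∧ evL lt pw e ≤ (m : Int) - 1 ∧ (m : Int) - 1 < min (evH lt e) (y_data.length : Int)
            then (1 : Int) else 0)).sum) := by
  unfold psum dda_diff
  have hfun : ∀ t ∈ List.range m,
      PySem.List.pyGetD ((PySem.List.enumerate y_data 0).foldl
        (dda_stepB lt pw (y_data.length : Int)) (List.replicate (y_data.length + 1) 0)) (t : Int) 0
      = ((PySem.List.enumerate y_data 0).map (fun e => dOne lt pw y_data.length e (t : Int))).sum := by
    intro t ht
    rw [diffB_get lt pw y_data.length _ _ (by simp) t]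
    rw [pyGetD_replicate_zero]
    ring
  rw [List.map_congr_left hfun, sum_swap_list]
  apply congrArg
  apply List.map_congr_left
  intro e _
  exact dOne_sum lt pw y_data.length e m

-- the two marked label lists agree under Pre_
lemma mark_eq (y_data : List Int) (lt pw : Int)
    (hpre : Pre_divide_data_online [] y_data lt pw) :
    dda_markA y_data lt pw = dda_markB y_data lt pw := by
  have hB : dda_markB y_data lt pw
      = (List.range y_data.length).map
          (fun j => if 0 < psum (dda_diff y_data lt pw) (j + 1) then 1 else 0) := by
    unfold dda_markB
    rw [scan_fold]
  have hlenA : (dda_markA y_data lt pw).length = y_data.length := by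
    unfold dda_markA; rw [markA_len]; simp
  apply List.ext_getElem
  · rw [hlenA, hB]; simp
  · intro i h1 h2
    have hi : i < y_data.length := by rw [hlenA] at h1; exact h1
    -- value of A's list at i
    have hgetA := PySem.List.pyGetD_eq_getElem (dda_markA y_data lt pw) (0 : Int)
      (i := (i : Int)) (by omega) (by rw [hlenA]; exact_mod_cast hi)
    simp only [Int.toNat_natCast] at hgetA
    have hA : PySem.List.pyGetD (dda_markA y_data lt pw) (i : Int) 0
        = if (∃ e ∈ PySem.List.enumerate y_data 0,
              e.2 = 1 ∧ evL lt pw e ≤ (i : Int) ∧ (i : Int) < evH lt e) then (1 : Int) else 0 := by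
      unfold dda_markA
      rw [markA_get lt pw _ _ i (by simpa using hi)]
      rw [pyGetD_replicate_zero]
    -- value of B's list at i
    have hBi : (dda_markB y_data lt pw)[i]'h2
        = if 0 < psum (dda_diff y_data lt pw) (i + 1) then (1 : Int) else 0 := by
      have hlist : (dda_markB y_data lt pw)[i]'h2
          = ((List.range y_data.length).map
              (fun j => if 0 < psum (dda_diff y_data lt pw) (j + 1) then (1 : Int) else 0))[i]'(by
                simpa using hi) := by
        congr 1
      rw [hlist]
      simp
    rw [← hgetA, hA, hBi]
    rw [psum_diff y_data lt pw (i + 1)]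
    rw [show ((i + 1 : Nat) : Int) - 1 = (i : Int) from by push_cast; ring]
    refine if_congr ?_ rfl rfl
    rw [sum_ind_pos]
    constructor
    · rintro ⟨e, hmem, h1', h3, h4⟩
      obtain ⟨k, hk, hek⟩ := (PySem.List.mem_enumerate_iff _ _ _).1 hmem
      have he1 : e.1 = (k : Int) := by rw [hek]; simp
      have he2 : e.2 = y_data[k] := by rw [hek]
      unfold evL at h3
      unfold evH at h4
      rw [he1] at h3 h4
      have hle : (k : Int) - lt + 2 ≤ (y_data.length : Int) :=
        hpre k hk (by rw [← he2]; exact h1') (by omega)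
      refine ⟨e, hmem, h1', ?_, ?_, ?_⟩
      · unfold evL evH; rw [he1]; omega
      · unfold evL; rw [he1]; omega
      · unfold evH; rw [he1]; omega
    · rintro ⟨e, hmem, h1', _, h3, h4⟩
      refine ⟨e, hmem, h1', h3, ?_⟩
      unfold evH at *
      omega

-- ===== VERDICT (by name: the statement is the Claim_ definition above) =====
theorem divide_data_online_spec : Claim_equal_divide_data_online := by
  intro x y lt pw _ hpre
  unfold Spec_divide_data_online
  have h : dda_markA y lt pw = dda_markB y lt pw := mark_eq y lt pw (by exact hpre)
  simp [divide_data_online, divide_data_online_alt, dda_sets, dda_cuts, h,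
    PySem.List.pyGetD, PySem.List.slice_zero_start]
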